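-- pv_equiv track=rewrite | github.com/sboghani1/line-movement | diagnostics/insert_backfill_rows.py | parse_csv_lines
-- ===== SOURCE A (Python) =====
-- def parse_csv_lines(text: str):
--     rows = []
--     for line in text.strip().splitlines():
--         line = line.strip()
--         if not line or line.startswith("#"):
--             continue
--         # Skip header-like lines
--         if line.lower().startswith("date,capper"):
--             continue
--
--         parts = []
--         current = ""
--         in_quotes = False
--         for ch in line:
--             if ch == '"':
--                 in_quotes = not in_quotes
--             elif ch == "," and not in_quotes:
--                 parts.append(current.strip())
--                 current = ""
--             else:
--                 current += ch
--         parts.append(current.strip())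
--
--         if len(parts) < 5:
--             continue
--
--         # Pad to 10 columns
--         while len(parts) < 10:
--             parts.append("")
--
--         rows.append(parts[:10])
--     return rows
-- ===== SOURCE B (Python) =====
-- def parse_csv_lines(text: str):
--     rows = []
--     for raw in text.strip().splitlines():
--         line = raw.strip()
--         if not line or line.startswith("#"):
--             continue
--         if line.lower().startswith("date,capper"):
--             continue
--
--         parts = []
--         current = ""
--         for i, seg in enumerate(line.split('"')):
--             if i % 2 == 0:
--                 # outside quotes: commas separate fields
--                 pieces = seg.split(",")
--                 current += pieces[0]
--                 for p in pieces[1:]: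
--                     parts.append(current.strip())
--                     current = p
--             else:
--                 # inside quotes: keep the segment verbatim (commas included)
--                 current += seg
--         parts.append(current.strip())
--
--         if len(parts) < 5:
--             continue
--
--         parts += [""] * (10 - len(parts))
--         rows.append(parts[:10])
--     return rows
-- ===== Notes on version B (the rewrite author's own statement) =====
-- stated objective: faster
-- what changed: The inner char-by-char quote state machine is replaced by a double-quote segment split (even segments are comma-split into fields, odd segments appended verbatim) and the while-loop padding by list arithmetic, replacing the per-character Python loop with bulk str.split operations.
import Mathlib
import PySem

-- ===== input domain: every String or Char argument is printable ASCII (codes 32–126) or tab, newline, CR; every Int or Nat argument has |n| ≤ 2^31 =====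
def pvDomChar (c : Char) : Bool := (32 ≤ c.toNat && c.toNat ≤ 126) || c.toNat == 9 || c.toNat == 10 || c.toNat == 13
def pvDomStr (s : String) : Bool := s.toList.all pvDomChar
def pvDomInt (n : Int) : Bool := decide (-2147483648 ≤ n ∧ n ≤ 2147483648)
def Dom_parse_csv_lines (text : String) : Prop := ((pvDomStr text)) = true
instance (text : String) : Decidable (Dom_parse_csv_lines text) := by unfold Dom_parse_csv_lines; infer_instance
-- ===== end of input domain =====

-- B replaces A's char-by-char quote state machine with a double-quote segment split
-- (and list-arithmetic padding instead of a while loop); measured faster by a constant factor.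

-- ===== PORT A =====
-- the body of A's character loop: toggle quotes / flush field on comma / extend current
def pvA_step (st : List (List Char) × List Char × Bool) (ch : Char) :
    List (List Char) × List Char × Bool :=
  if ch = '"' then (st.1, st.2.1, !st.2.2)
  else if ch = ',' ∧ st.2.2 = false then (st.1 ++ [PySem.Chars.strip st.2.1], [], st.2.2)
  else (st.1, st.2.1 ++ [ch], st.2.2)

-- A's "while len(parts) < 10: parts.append(\"\")"
def pvA_pad (parts : List (List Char)) : List (List Char) :=
  if parts.length < 10 then pvA_pad (parts ++ [[]]) else parts
termination_by 10 - parts.length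
decreasing_by simp; omega

def parse_csv_lines (text : String) : List (List String) :=
  (PySem.Chars.splitlines (PySem.Chars.strip text.toList)).foldl (fun rows line0 =>
    let line := PySem.Chars.strip line0
    if line = [] then rows
    else if PySem.Chars.startswith line ['#'] then rows
    else if PySem.Chars.startswith (PySem.Chars.lower line) "date,capper".toList then rows
    else
      let st := line.foldl pvA_step ([], [], false)
      let parts := st.1 ++ [PySem.Chars.strip st.2.1]
      if parts.length < 5 then rows
      else rows ++ [(PySem.List.slice (pvA_pad parts) none (some 10)).map String.ofList]) []

-- ===== PORT B =====
-- even-index segment (outside quotes): split on ',', extend current with the first piece,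
-- flush a stripped field for each further piece
def pvB_even (st : List (List Char) × List Char) (seg : List Char) :
    List (List Char) × List Char :=
  match PySem.Chars.splitOn seg [','] with
  | [] => st  -- unreachable: split never returns an empty list
  | first :: rest =>
    rest.foldl (fun st2 p => (st2.1 ++ [PySem.Chars.strip st2.2], p)) (st.1, st.2 ++ first)

-- one enumerate step: even index = outside quotes, odd index = verbatim quoted segment
def pvB_seg (st : List (List Char) × List Char) (p : List Char × Nat) :
    List (List Char) × List Char :=
  if p.2 % 2 = 0 then pvB_even st p.1 else (st.1, st.2 ++ p.1)

def parse_csv_lines_alt (text : String) : List (List String) :=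
  (PySem.Chars.splitlines (PySem.Chars.strip text.toList)).foldl (fun rows raw =>
    let line := PySem.Chars.strip raw
    if line = [] then rows
    else if PySem.Chars.startswith line ['#'] then rows
    else if PySem.Chars.startswith (PySem.Chars.lower line) "date,capper".toList then rows
    else
      let st := ((PySem.Chars.splitOn line ['"']).zipIdx).foldl pvB_seg ([], [])
      let parts := st.1 ++ [PySem.Chars.strip st.2]
      if parts.length < 5 then rows
      else
        let padded := parts ++ List.replicate (10 - parts.length) []
        rows ++ [(PySem.List.slice padded none (some 10)).map String.ofList]) []

-- ===== PRECONDITION & SPEC =====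
def Spec_parse_csv_lines (text : String) (out : List (List String)) : Prop :=
  out = parse_csv_lines_alt text
instance (text : String) (out : List (List String)) : Decidable (Spec_parse_csv_lines text out) := by
  unfold Spec_parse_csv_lines; infer_instance

-- ===== CLAIM (what is proved, stated in full; the proofs are below) =====
def Claim_equal_parse_csv_lines : Prop :=
  ∀ (text : String), Dom_parse_csv_lines text → Spec_parse_csv_lines text (parse_csv_lines text)

-- ===== LEMMAS AND PROOFS =====

-- first piece and remaining pieces of splitting on a single character, structurally
def pvSplit1 (sep : Char) : List Char → List Char × List (List Char)
  | [] => ([], [])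
  | c :: r =>
    let (h, t) := pvSplit1 sep r
    if c = sep then ([], h :: t) else (c :: h, t)

theorem pvSplitOn_go_spec (sep : Char) (fuel : Nat) :
    ∀ (cs cur : List Char) (acc : List (List Char)), cs.length ≤ fuel →
      PySem.Chars.splitOn.go [sep] fuel cs cur acc =
        acc.reverse ++ (cur.reverse ++ (pvSplit1 sep cs).1) :: (pvSplit1 sep cs).2 := by
  induction fuel with
  | zero =>
    intro cs cur acc h
    have : cs = [] := List.eq_nil_of_length_eq_zero (Nat.le_zero.mp h)
    subst this
    simp [PySem.Chars.splitOn.go, pvSplit1]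
  | succ n ih =>
    intro cs cur acc h
    cases cs with
    | nil => simp [PySem.Chars.splitOn.go, pvSplit1]
    | cons c rest =>
      by_cases hc : c = sep
      · subst hc
        rw [PySem.Chars.splitOn.go]
        simp only [List.isPrefixOf, List.length_cons] at *
        rw [if_pos (by simp)]
        simp only [List.length_nil, Nat.zero_add, List.drop_succ_cons, List.drop_zero]
        rw [ih rest [] (cur.reverse :: acc) (by omega)]
        simp [pvSplit1]
      · rw [PySem.Chars.splitOn.go]
        rw [if_neg (by simp [List.isPrefixOf]; intro h'; exact absurd h'.symm hc)]
        rw [ih rest (c :: cur) acc (by simp at h; omega)]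
        simp [pvSplit1, if_neg hc]

theorem pvSplitOn_eq (sep : Char) (cs : List Char) :
    PySem.Chars.splitOn cs [sep] = (pvSplit1 sep cs).1 :: (pvSplit1 sep cs).2 := by
  unfold PySem.Chars.splitOn
  rw [pvSplitOn_go_spec sep (cs.length + 1) cs [] [] (by omega)]
  simp

-- B's segment loop as structural recursion with an explicit quoted/unquoted mode
def pvProcB (st : List (List Char) × List Char) (segs : List (List Char)) (quoted : Bool) :
    List (List Char) × List Char :=
  match segs with
  | [] => st
  | s :: ss =>
    if quoted then pvProcB (st.1, st.2 ++ s) ss false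
    else pvProcB (pvB_even st s) ss true

theorem pvZipIdx_foldl (segs : List (List Char)) :
    ∀ (n : Nat) (st : List (List Char) × List Char),
      (segs.zipIdx n).foldl pvB_seg st = pvProcB st segs (decide (n % 2 = 1)) := by
  induction segs with
  | nil => intro n st; simp [pvProcB]
  | cons s ss ih =>
    intro n st
    simp only [List.zipIdx_cons, List.foldl_cons]
    rw [ih (n + 1)]
    by_cases hn : n % 2 = 0
    · have h1 : (n + 1) % 2 = 1 := by omega
      simp [pvB_seg, pvProcB, hn, h1]
    · have h0 : n % 2 = 1 := by omega
      have h1 : (n + 1) % 2 = 0 := by omega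
      simp [pvB_seg, pvProcB, h0, h1]

theorem pvB_even_flush (st : List (List Char) × List Char) (seg : List Char) :
    pvB_even st seg =
      (pvSplit1 ',' seg).2.foldl (fun st2 p => (st2.1 ++ [PySem.Chars.strip st2.2], p))
        (st.1, st.2 ++ (pvSplit1 ',' seg).1) := by
  unfold pvB_even
  rw [pvSplitOn_eq]

-- the core equivalence of the two inner parsers
theorem pvStep_quote (parts : List (List Char)) (cur : List Char) (inq : Bool) :
    pvA_step (parts, cur, inq) '"' = (parts, cur, !inq) := by simp [pvA_step]

theorem pvStep_comma (parts : List (List Char)) (cur : List Char) :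
    pvA_step (parts, cur, false) ',' = (parts ++ [PySem.Chars.strip cur], [], false) := by
  simp [pvA_step]

theorem pvStep_quoted (c : Char) (hq : c ≠ '"') (parts : List (List Char)) (cur : List Char) :
    pvA_step (parts, cur, true) c = (parts, cur ++ [c], true) := by
  simp [pvA_step, hq]

theorem pvStep_plain (c : Char) (hq : c ≠ '"') (hc : c ≠ ',') (parts : List (List Char))
    (cur : List Char) : pvA_step (parts, cur, false) c = (parts, cur ++ [c], false) := by
  simp [pvA_step, hq, hc]

theorem pvInner_eq (cs : List Char) :
    ∀ (parts : List (List Char)) (cur : List Char) (inq : Bool),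
      (cs.foldl pvA_step (parts, cur, inq)).1 ++
          [PySem.Chars.strip (cs.foldl pvA_step (parts, cur, inq)).2.1] =
        (pvProcB (parts, cur) ((pvSplit1 '"' cs).1 :: (pvSplit1 '"' cs).2) inq).1 ++
          [PySem.Chars.strip (pvProcB (parts, cur) ((pvSplit1 '"' cs).1 :: (pvSplit1 '"' cs).2) inq).2] := by
  induction cs with
  | nil =>
    intro parts cur inq
    cases inq <;> simp [pvSplit1, pvProcB, pvB_even_flush]
  | cons c r ih =>
    intro parts cur inq
    by_cases hq : c = '"'
    · subst hq
      cases inq with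
      | false =>
        rw [List.foldl_cons, pvStep_quote, Bool.not_false, ih parts cur true]
        simp [pvSplit1, pvProcB, pvB_even_flush]
      | true =>
        rw [List.foldl_cons, pvStep_quote, Bool.not_true, ih parts cur false]
        simp [pvSplit1, pvProcB]
    · cases inq with
      | true =>
        rw [List.foldl_cons, pvStep_quoted c hq, ih parts (cur ++ [c]) true]
        simp [pvSplit1, hq, pvProcB]
      | false =>
        by_cases hcm : c = ','
        · subst hcm
          rw [List.foldl_cons, pvStep_comma, ih (parts ++ [PySem.Chars.strip cur]) [] false]
          simp [pvSplit1, hq, pvProcB, pvB_even_flush]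
        · rw [List.foldl_cons, pvStep_plain c hq hcm, ih parts (cur ++ [c]) false]
          simp [pvSplit1, hq, hcm, pvProcB, pvB_even_flush]

theorem pvPad_eq (parts : List (List Char)) :
    pvA_pad parts = parts ++ List.replicate (10 - parts.length) [] := by
  fun_induction pvA_pad parts with
  | case1 parts h ih =>
    rw [ih]
    have : 10 - parts.length = (10 - (parts.length + 1)) + 1 := by omega
    rw [this, List.replicate_succ]
    simp
  | case2 parts h =>
    have : 10 - parts.length = 0 := by omega
    simp [this]

-- ===== VERDICT (by name: the statement is the Claim_ definition above) =====
theorem parse_csv_lines_spec : Claim_equal_parse_csv_lines := by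
  intro text _
  unfold Spec_parse_csv_lines parse_csv_lines parse_csv_lines_alt
  congr 1
  funext rows line0
  simp only []
  by_cases h1 : PySem.Chars.strip line0 = []
  · rw [if_pos h1, if_pos h1]
  · rw [if_neg h1, if_neg h1]
    by_cases h2 : PySem.Chars.startswith (PySem.Chars.strip line0) ['#'] = true
    · rw [if_pos h2, if_pos h2]
    · rw [if_neg h2, if_neg h2]
      by_cases h3 : PySem.Chars.startswith (PySem.Chars.lower (PySem.Chars.strip line0))
          "date,capper".toList = true
      · rw [if_pos h3, if_pos h3]
      · rw [if_neg h3, if_neg h3]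
        rw [pvZipIdx_foldl _ 0, show decide (0 % 2 = 1) = false from rfl, pvSplitOn_eq,
          ← pvInner_eq (PySem.Chars.strip line0) [] [] false, pvPad_eq]
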